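-- pv_equiv track=rewrite | github.com/johansievertlindeskog/EDAN20-Language-Technology | extractingNounGroupsLab4.py | chunk_dist
-- ===== SOURCE A (Python) =====
-- def chunk_dist(corpus):  # ett corpus
--     chunk_dict = {}
--     for sentence in corpus:
--         for row in sentence:
--             if row['pos'] not in chunk_dict:
--                 chunk_dict[row['pos']] = {}
--
--             if row['chunk'] in chunk_dict[row['pos']]:
--                 chunk_dict[row['pos']][row['chunk']] += 1
--             else:
--                 chunk_dict[row['pos']][row['chunk']] = 1
--
--     return chunk_dict
-- ===== SOURCE B (Python) =====
-- def chunk_dist(corpus):  # ett corpus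
--     # pass 1: flat tally keyed by (pos, chunk)
--     flat = {}
--     for sentence in corpus:
--         for row in sentence:
--             key = (row['pos'], row['chunk'])
--             flat[key] = flat.get(key, 0) + 1
--     # pass 2: reshape the flat tally into the nested dict
--     result = {}
--     for (pos, chunk), count in flat.items():
--         result.setdefault(pos, {})[chunk] = count
--     return result
-- ===== Notes on version B (the rewrite author's own statement) =====
-- stated objective: alternative
-- what changed: A counts incrementally into a nested dict inside one nested loop; B first builds a flat (pos, chunk)-keyed tally in one pass and then reshapes that flat map into the nested dict in a separate second pass.
import Mathlib
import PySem

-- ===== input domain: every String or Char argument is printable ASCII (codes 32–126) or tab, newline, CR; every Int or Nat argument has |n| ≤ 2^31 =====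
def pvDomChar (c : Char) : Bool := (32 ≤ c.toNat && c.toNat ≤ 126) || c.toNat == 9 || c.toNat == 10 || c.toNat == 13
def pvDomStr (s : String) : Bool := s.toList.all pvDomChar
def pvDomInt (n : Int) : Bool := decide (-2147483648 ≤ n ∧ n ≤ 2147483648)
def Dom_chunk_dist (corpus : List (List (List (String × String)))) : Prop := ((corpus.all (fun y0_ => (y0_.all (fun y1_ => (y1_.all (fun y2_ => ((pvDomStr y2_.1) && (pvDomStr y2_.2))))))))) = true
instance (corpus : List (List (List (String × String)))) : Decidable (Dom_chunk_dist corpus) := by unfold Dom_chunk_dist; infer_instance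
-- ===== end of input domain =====

-- B replaces A's single nested incremental-counting loop by a two-pass decomposition: a flat
-- (pos, chunk)-keyed tally built in one pass, then a separate reshape pass into the nested dict.

-- ===== PORT A =====
-- row['pos'], row['chunk'] (first-match lookup; Pre_ guarantees both keys are present)
def pvRowKey (row : List (String × String)) : String × String :=
  ((PySem.Dict.mk row).getD "pos" "", (PySem.Dict.mk row).getD "chunk" "")

-- the body of A's inner loop, on the pair (row['pos'], row['chunk'])
def chunkStepA (d : PySem.Dict String (PySem.Dict String Int)) (k : String × String) :
    PySem.Dict String (PySem.Dict String Int) :=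
  let d1 := if d.contains k.1 then d else d.insert k.1 PySem.Dict.empty
  let inner := d1.getD k.1 PySem.Dict.empty
  if inner.contains k.2 then
    d1.insert k.1 (inner.insert k.2 (inner.getD k.2 0 + 1))
  else
    d1.insert k.1 (inner.insert k.2 1)

def chunk_dist (corpus : List (List (List (String × String)))) : List (String × List (String × Int)) :=
  let d := corpus.foldl
    (fun d sentence => sentence.foldl (fun d row => chunkStepA d (pvRowKey row)) d)
    PySem.Dict.empty
  d.items.map (fun p => (p.1, p.2.items))

-- ===== PORT B =====
-- pass 2 body: result.setdefault(pos, {})[chunk] = count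
def chunkReshape (res : PySem.Dict String (PySem.Dict String Int)) (p : (String × String) × Int) :
    PySem.Dict String (PySem.Dict String Int) :=
  let res1 := res.setdefault p.1.1 PySem.Dict.empty
  res1.insert p.1.1 ((res1.getD p.1.1 PySem.Dict.empty).insert p.1.2 p.2)

def chunk_dist_alt (corpus : List (List (List (String × String)))) : List (String × List (String × Int)) :=
  let flat : PySem.Dict (String × String) Int := corpus.foldl
    (fun f sentence => sentence.foldl
      (fun f row =>
        let key := pvRowKey row
        f.insert key (f.getD key 0 + 1)) f)
    PySem.Dict.empty
  let result := flat.items.foldl chunkReshape PySem.Dict.empty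
  result.items.map (fun q => (q.1, q.2.items))

-- ===== PRECONDITION & SPEC =====
-- Pre_ excludes exactly the rows lacking a 'pos' or 'chunk' key, on which Python A raises KeyError.
def Pre_chunk_dist (corpus : List (List (List (String × String)))) : Prop :=
  ∀ s ∈ corpus, ∀ row ∈ s, "pos" ∈ row.map Prod.fst ∧ "chunk" ∈ row.map Prod.fst
instance (corpus : List (List (List (String × String)))) : Decidable (Pre_chunk_dist corpus) := by
  unfold Pre_chunk_dist; infer_instance

def pvWitness_chunk_dist : (List (List (List (String × String)))) :=
  [[[("pos", "NN"), ("chunk", "I-NP")], [("pos", "VB"), ("chunk", "O")]], [[("pos", "NN"), ("chunk", "I-NP")]]]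

def Spec_chunk_dist (corpus : List (List (List (String × String)))) (out : List (String × List (String × Int))) : Prop := out = chunk_dist_alt corpus
instance (corpus : List (List (List (String × String)))) (out : List (String × List (String × Int))) : Decidable (Spec_chunk_dist corpus out) := by unfold Spec_chunk_dist; infer_instance

-- ===== CLAIM (what is proved, stated in full; the proofs are below) =====
def Claim_equal_chunk_dist : Prop := ∀ (corpus : List (List (List (String × String)))), Dom_chunk_dist corpus → Pre_chunk_dist corpus → Spec_chunk_dist corpus (chunk_dist corpus)

-- ===== LEMMAS AND PROOFS =====

theorem pv_d1_getD (d : PySem.Dict String (PySem.Dict String Int)) (a : String) :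
    ((if d.contains a then d else d.insert a PySem.Dict.empty).getD a PySem.Dict.empty)
      = d.getD a PySem.Dict.empty := by
  by_cases h : d.contains a = true
  · simp [h]
  · have h' : d.contains a = false := by simpa using h
    simp [h', PySem.Dict.getD_insert_self, PySem.Dict.getD_of_not_contains _ _ h']

theorem pv_d1_getD_ne (d : PySem.Dict String (PySem.Dict String Int)) (a p : String) (hp : p ≠ a) :
    ((if d.contains a then d else d.insert a PySem.Dict.empty).getD p PySem.Dict.empty)
      = d.getD p PySem.Dict.empty := by
  by_cases h : d.contains a = true
  · simp [h]
  · simp [h, PySem.Dict.getD_insert_of_ne _ _ _ hp]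

theorem pv_stepA_contains (d : PySem.Dict String (PySem.Dict String Int)) (k : String × String)
    (p c : String) :
    ((chunkStepA d k).getD p PySem.Dict.empty).contains c
      = (((p, c) == k) || ((d.getD p PySem.Dict.empty).contains c)) := by
  rcases k with ⟨a, b⟩
  by_cases hp : p = a
  · subst hp
    simp only [chunkStepA]
    rw [pv_d1_getD]
    have hbeq : ((p, c) == (p, b)) = (c == b) := by simp
    split <;>
      simp [PySem.Dict.getD_insert_self, PySem.Dict.contains_insert, hbeq]
  · have hne : ((p, c) == (a, b)) = false := by simp [hp]
    simp only [chunkStepA]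
    rw [pv_d1_getD]
    have h2 : ∀ X, ((if d.contains a then d else d.insert a PySem.Dict.empty).insert a X).getD p
        PySem.Dict.empty = d.getD p PySem.Dict.empty := by
      intro X
      rw [PySem.Dict.getD_insert_of_ne _ _ _ hp, pv_d1_getD_ne _ _ _ hp]
    split <;> simp [h2, hne]

theorem pv_setdefault_getD_ne (s : PySem.Dict String (PySem.Dict String Int)) (a p : String)
    (v : PySem.Dict String Int) (hp : p ≠ a) :
    (s.setdefault a v).getD p PySem.Dict.empty = s.getD p PySem.Dict.empty := by
  by_cases h : s.contains a = true
  · rw [PySem.Dict.setdefault_of_contains _ _ h]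
  · rw [PySem.Dict.setdefault_of_not_contains _ _ (by simpa using h),
      PySem.Dict.getD_insert_of_ne _ _ _ hp]

theorem pv_reshape_contains (s : PySem.Dict String (PySem.Dict String Int))
    (j : String × String) (w : Int) (p c : String) :
    ((chunkReshape s (j, w)).getD p PySem.Dict.empty).contains c
      = (((p, c) == j) || ((s.getD p PySem.Dict.empty).contains c)) := by
  rcases j with ⟨a, b⟩
  by_cases hp : p = a
  · subst hp
    have hbeq : ((p, c) == (p, b)) = (c == b) := by simp
    simp [chunkReshape, PySem.Dict.getD_insert_self, PySem.Dict.contains_insert,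
      PySem.Dict.getD_setdefault_self, hbeq]
  · have hne : ((p, c) == (a, b)) = false := by simp [hp]
    simp [chunkReshape, PySem.Dict.getD_insert_of_ne _ _ _ hp,
      pv_setdefault_getD_ne _ _ _ _ hp, hne]

theorem pv_foldA_contains (ks : List (String × String)) (p c : String) :
    ((ks.foldl chunkStepA PySem.Dict.empty).getD p PySem.Dict.empty).contains c
      = decide ((p, c) ∈ ks) := by
  induction ks using List.reverseRecOn with
  | nil => simp [PySem.Dict.getD_empty, PySem.Dict.contains_empty]
  | append_singleton xs x ih =>
    rw [List.foldl_append]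
    simp only [List.foldl_cons, List.foldl_nil, pv_stepA_contains, ih]
    by_cases h : (p, c) = x <;> simp [h, List.mem_append]

theorem pv_contains_outer (d : PySem.Dict String (PySem.Dict String Int)) (p c : String)
    (hk : ((d.getD p PySem.Dict.empty).contains c) = true) : d.contains p = true := by
  by_cases h : d.contains p = true
  · exact h
  · rw [PySem.Dict.getD_of_not_contains _ _ (by simpa using h)] at hk
    simp [PySem.Dict.contains_empty] at hk

theorem pv_stepA_fresh (d : PySem.Dict String (PySem.Dict String Int)) (p c : String)
    (h : ((d.getD p PySem.Dict.empty).contains c) = false) :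
    chunkStepA d (p, c) = chunkReshape d ((p, c), 1) := by
  simp only [chunkStepA, chunkReshape]
  rw [pv_d1_getD, h]
  simp only [Bool.false_eq_true, if_false]
  by_cases hp : d.contains p = true
  · rw [PySem.Dict.setdefault_of_contains _ _ hp, if_pos hp]
  · have hp' : d.contains p = false := by simpa using hp
    rw [PySem.Dict.setdefault_of_not_contains _ _ hp', if_neg (by simp [hp']),
      PySem.Dict.getD_insert_self, PySem.Dict.getD_of_not_contains _ _ hp']

theorem pv_stepA_reshape_same (d : PySem.Dict String (PySem.Dict String Int)) (p c : String)
    (v : Int) :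
    chunkStepA (chunkReshape d ((p, c), v)) (p, c) = chunkReshape d ((p, c), v + 1) := by
  simp only [chunkStepA, chunkReshape]
  simp [PySem.Dict.getD_insert_self, PySem.Dict.insert_insert_self]

theorem pv_insert_comm_of_contains_left {κ ν : Type} [BEq κ] [LawfulBEq κ]
    (d : PySem.Dict κ ν) (a b : κ) (x y : ν) (ha : d.contains a = true) (hab : a ≠ b) :
    (d.insert b y).insert a x = (d.insert a x).insert b y := by
  have ha1 : (d.insert b y).contains a = true := by
    rw [PySem.Dict.contains_insert]; simp [ha]
  by_cases hb : d.contains b = true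
  · have hb1 : (d.insert a x).contains b = true := by
      rw [PySem.Dict.contains_insert]; simp [hb]
    apply PySem.Dict.ext
    rw [PySem.Dict.items_insert_of_contains _ _ ha1,
        PySem.Dict.items_insert_of_contains _ _ hb,
        PySem.Dict.items_insert_of_contains _ _ hb1,
        PySem.Dict.items_insert_of_contains _ _ ha]
    simp only [List.map_map]
    apply List.map_congr_left
    intro p _
    by_cases h1 : (p.1 == b) = true <;> by_cases h2 : (p.1 == a) = true <;>
      simp_all [Function.comp]
  · have hb' : d.contains b = false := by simpa using hb
    have hba' : (b == a) = false := by simp [Ne.symm hab]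
    have hb1 : (d.insert a x).contains b = false := by
      rw [PySem.Dict.contains_insert]; simp [hb', hba']
    apply PySem.Dict.ext
    rw [PySem.Dict.items_insert_of_contains _ _ ha1,
        PySem.Dict.items_insert_of_not_contains _ _ hb',
        PySem.Dict.items_insert_of_not_contains _ _ hb1,
        PySem.Dict.items_insert_of_contains _ _ ha]
    simp [List.map_append]
    intro h
    exact absurd h (Ne.symm hab)

theorem pv_stepA_eq (d : PySem.Dict String (PySem.Dict String Int)) (p c : String)
    (hdp : d.contains p = true)
    (hk : ((d.getD p PySem.Dict.empty).contains c) = true) :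
    chunkStepA d (p, c)
      = d.insert p ((d.getD p PySem.Dict.empty).insert c
          ((d.getD p PySem.Dict.empty).getD c 0 + 1)) := by
  simp only [chunkStepA]
  rw [if_pos hdp, if_pos hk]

theorem pv_stepA_reshape_comm (d : PySem.Dict String (PySem.Dict String Int))
    (p c : String) (j : String × String) (w : Int)
    (hk : ((d.getD p PySem.Dict.empty).contains c) = true) (hne : j ≠ (p, c)) :
    chunkStepA (chunkReshape d (j, w)) (p, c) = chunkReshape (chunkStepA d (p, c)) (j, w) := by
  rcases j with ⟨a, b⟩
  have hdp : d.contains p = true := pv_contains_outer d p c hk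
  rw [pv_stepA_eq d p c hdp hk]
  set I := d.getD p PySem.Dict.empty with hI
  set Y := I.insert c (I.getD c 0 + 1) with hY
  by_cases hap : a = p
  · subst hap
    have hbc : c ≠ b := by intro h; exact hne (by rw [h])
    have hR : chunkReshape d ((a, b), w) = d.insert a (I.insert b w) := by
      simp only [chunkReshape]
      rw [PySem.Dict.setdefault_of_contains _ _ hdp, ← hI]
    rw [hR]
    have hc1 : (d.insert a (I.insert b w)).contains a = true := by
      simp
    have hk1 : (((d.insert a (I.insert b w)).getD a PySem.Dict.empty).contains c) = true := by
      rw [PySem.Dict.getD_insert_self, PySem.Dict.contains_insert]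
      simp [hk]
    rw [pv_stepA_eq _ _ _ hc1 hk1, PySem.Dict.getD_insert_self,
      PySem.Dict.getD_insert_of_ne _ _ _ hbc, PySem.Dict.insert_insert_self]
    simp only [chunkReshape]
    rw [PySem.Dict.setdefault_of_contains _ _ (by simp),
      PySem.Dict.getD_insert_self,
      PySem.Dict.insert_insert_self]
    rw [pv_insert_comm_of_contains_left I c b _ _ hk hbc]
  · have hpa : p ≠ a := fun h => hap h.symm
    have hX : chunkReshape d ((a, b), w) = d.insert a ((d.getD a PySem.Dict.empty).insert b w) := by
      simp only [chunkReshape]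
      by_cases ha : d.contains a = true
      · rw [PySem.Dict.setdefault_of_contains _ _ ha]
      · have ha' : d.contains a = false := by simpa using ha
        rw [PySem.Dict.setdefault_of_not_contains _ _ ha', PySem.Dict.getD_insert_self,
          PySem.Dict.insert_insert_self, PySem.Dict.getD_of_not_contains _ _ ha']
    set X' := (d.getD a PySem.Dict.empty).insert b w with hX'
    rw [hX]
    have hc1 : (d.insert a X').contains p = true := by
      rw [PySem.Dict.contains_insert]; simp [hdp]
    have hk1 : (((d.insert a X').getD p PySem.Dict.empty).contains c) = true := by
      rw [PySem.Dict.getD_insert_of_ne _ _ _ hpa, ← hI]; exact hk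
    rw [pv_stepA_eq _ _ _ hc1 hk1, PySem.Dict.getD_insert_of_ne _ _ _ hpa, ← hI, ← hY]
    simp only [chunkReshape]
    have ht : (d.insert p Y).contains a = d.contains a := by
      rw [PySem.Dict.contains_insert]; simp [hap]
    by_cases ha : d.contains a = true
    · rw [PySem.Dict.setdefault_of_contains _ _ (ht.trans ha),
        PySem.Dict.getD_insert_of_ne _ _ _ hap, ← hX']
      exact pv_insert_comm_of_contains_left d p a Y _ hdp hpa
    · have ha' : d.contains a = false := by simpa using ha
      rw [PySem.Dict.setdefault_of_not_contains _ _ (ht.trans ha'),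
        PySem.Dict.getD_insert_self, PySem.Dict.insert_insert_self]
      have : X' = PySem.Dict.empty.insert b w := by
        rw [hX', PySem.Dict.getD_of_not_contains _ _ ha']
      rw [← this]
      exact pv_insert_comm_of_contains_left d p a Y X' hdp hpa

theorem pv_stepA_foldr_comm (L : List ((String × String) × Int)) (p c : String)
    (hL : ∀ q ∈ L, q.1 ≠ (p, c)) (s : PySem.Dict String (PySem.Dict String Int))
    (hk : ((s.getD p PySem.Dict.empty).contains c) = true) :
    chunkStepA (L.foldl chunkReshape s) (p, c) = L.foldl chunkReshape (chunkStepA s (p, c)) := by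
  induction L generalizing s with
  | nil => rfl
  | cons q L ih =>
    rcases q with ⟨j, w⟩
    have hj : j ≠ (p, c) := hL (j, w) (List.mem_cons_self ..)
    have hk' : (((chunkReshape s (j, w)).getD p PySem.Dict.empty).contains c) = true := by
      rw [pv_reshape_contains]; simp [hk]
    simp only [List.foldl_cons]
    rw [ih (fun q hq => hL q (List.mem_cons_of_mem _ hq)) _ hk',
      pv_stepA_reshape_comm s p c j w hk hj]

theorem pv_count_append_singleton_self (xs : List (String × String)) (k : String × String) :
    (xs ++ [k]).count k = xs.count k + 1 := by
  simp [List.count_append]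

theorem pv_count_append_singleton_ne (xs : List (String × String)) (k j : String × String)
    (h : j ≠ k) : (xs ++ [k]).count j = xs.count j := by
  have h' : k ≠ j := Ne.symm h
  simp [List.count_append, h']

theorem pv_main (ks : List (String × String)) :
    ks.foldl chunkStepA PySem.Dict.empty
      = ((PySem.Set.ofList ks).map (fun j => (j, (ks.count j : Int)))).foldl chunkReshape
          PySem.Dict.empty := by
  induction ks using List.reverseRecOn with
  | nil => rfl
  | append_singleton xs k ih =>
    rcases k with ⟨p, c⟩
    rw [List.foldl_append, List.foldl_cons, List.foldl_nil]
    rw [PySem.Set.ofList_append_singleton]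
    by_cases hmem : (p, c) ∈ xs
    · rw [PySem.Set.add_of_mem (by rw [PySem.Set.mem_ofList]; exact hmem)]
      obtain ⟨D₁, D₂, hsplit⟩ := List.append_of_mem ((PySem.Set.mem_ofList _ _).2 hmem)
      have hnd : (D₁ ++ (p, c) :: D₂).Nodup := by
        rw [← hsplit]; exact PySem.Set.nodup_ofList xs
      have hnotD₁ : (p, c) ∉ D₁ := fun h =>
        (List.disjoint_of_nodup_append hnd) h (List.mem_cons_self ..)
      have hnotD₂ : (p, c) ∉ D₂ := (List.nodup_cons.1 hnd.of_append_right).1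
      rw [ih, hsplit]
      simp only [List.map_append, List.map_cons]
      rw [List.map_congr_left (l := D₁)
        (f := fun j => (j, (((xs ++ [(p, c)]).count j : Nat) : Int)))
        (g := fun j => (j, (xs.count j : Int)))
        (fun j hj => by
          have hne : j ≠ (p, c) := fun h => hnotD₁ (h ▸ hj)
          simp [pv_count_append_singleton_ne xs (p, c) j hne]),
        List.map_congr_left (l := D₂)
        (f := fun j => (j, (((xs ++ [(p, c)]).count j : Nat) : Int)))
        (g := fun j => (j, (xs.count j : Int)))
        (fun j hj => by
          have hne : j ≠ (p, c) := fun h => hnotD₂ (h ▸ hj)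
          simp [pv_count_append_singleton_ne xs (p, c) j hne]),
        pv_count_append_singleton_self]
      simp only [List.foldl_append, List.foldl_cons]
      push_cast
      rw [pv_stepA_foldr_comm (D₂.map (fun j => (j, (xs.count j : Int)))) p c
        (fun q hq => by
          obtain ⟨j, hj, rfl⟩ := List.mem_map.1 hq
          exact fun h => hnotD₂ (h ▸ hj))
        _ (by rw [pv_reshape_contains]; simp)]
      rw [pv_stepA_reshape_same]
    · rw [PySem.Set.add_of_not_mem (by rw [PySem.Set.mem_ofList]; exact hmem)]
      rw [List.map_append, List.map_cons, List.map_nil]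
      rw [List.map_congr_left (l := PySem.Set.ofList xs)
        (f := fun j => (j, (((xs ++ [(p, c)]).count j : Nat) : Int)))
        (g := fun j => (j, (xs.count j : Int)))
        (fun j hj => by
          have hne : j ≠ (p, c) := fun h => hmem (h ▸ (PySem.Set.mem_ofList _ _).1 hj)
          simp [pv_count_append_singleton_ne xs (p, c) j hne]),
        pv_count_append_singleton_self, List.count_eq_zero_of_not_mem hmem]
      rw [List.foldl_append, List.foldl_cons, List.foldl_nil, ← ih]
      rw [pv_stepA_fresh _ _ _ (by rw [pv_foldA_contains]; simp [hmem])]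
      norm_num

theorem pv_A_fold (corpus : List (List (List (String × String)))) :
    corpus.foldl (fun d sentence => sentence.foldl (fun d row => chunkStepA d (pvRowKey row)) d)
        PySem.Dict.empty
      = (corpus.flatten.map pvRowKey).foldl chunkStepA PySem.Dict.empty := by
  rw [List.foldl_map, List.foldl_flatten]

theorem pv_B_fold (corpus : List (List (List (String × String)))) :
    corpus.foldl (fun f sentence => sentence.foldl
        (fun f row =>
          let key := pvRowKey row
          f.insert key (f.getD key 0 + 1)) f)
        PySem.Dict.empty
      = PySem.Dict.counter (corpus.flatten.map pvRowKey) := by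
  rw [← PySem.Dict.foldl_insert_getD_add_one_eq_counter, List.foldl_map, List.foldl_flatten]

-- ===== VERDICT (by name: the statement is the Claim_ definition above) =====
theorem chunk_dist_spec : Claim_equal_chunk_dist := by
  intro corpus _ _
  show chunk_dist corpus = chunk_dist_alt corpus
  simp only [chunk_dist, chunk_dist_alt]
  rw [pv_A_fold, pv_B_fold, PySem.Dict.items_counter, pv_main]
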